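-- pv_equiv track=rewrite | github.com/joannsum/XightMD | backend/agents/qa_agent.py | calculate_expected_urgency
-- ===== SOURCE A (Python) =====
-- from typing import Dict, Any, Optional, List
--
-- def calculate_expected_urgency(critical_findings: List[str]) -> tuple:
--     """Calculate expected urgency range"""
--     if any('Pneumothorax' in finding for finding in critical_findings):
--         return (4, 5)
--     elif any('Mass' in finding for finding in critical_findings):
--         return (3, 4)
--     elif any('Pneumonia' in finding for finding in critical_findings):
--         return (3, 4)
--     elif critical_findings:
--         return (2, 3)
--     else:
--         return (1, 2)
-- ===== SOURCE B (Python) =====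
-- _RANGES = {0: (1, 2), 1: (2, 3), 2: (3, 4), 3: (4, 5)}
-- _KEYWORDS = {'Pneumothorax': 3, 'Mass': 2, 'Pneumonia': 2}
--
-- def _score(finding):
--     """Severity level of one finding: highest priority among matching keywords, 1 if none."""
--     return max((p for k, p in _KEYWORDS.items() if k in finding), default=1)
--
-- def calculate_expected_urgency(critical_findings):
--     """Calculate expected urgency range"""
--     level = max(map(_score, critical_findings), default=0)
--     return _RANGES[level]
-- ===== Notes on version B (the rewrite author's own statement) =====
-- stated objective: alternative
-- what changed: B assigns each finding a numeric severity score from a keyword-priority table, takes the maximum score over the list (0 when empty), and returns the range looked up in a level-to-range table, replacing A's chain of per-keyword any() scans.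
import Mathlib
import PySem

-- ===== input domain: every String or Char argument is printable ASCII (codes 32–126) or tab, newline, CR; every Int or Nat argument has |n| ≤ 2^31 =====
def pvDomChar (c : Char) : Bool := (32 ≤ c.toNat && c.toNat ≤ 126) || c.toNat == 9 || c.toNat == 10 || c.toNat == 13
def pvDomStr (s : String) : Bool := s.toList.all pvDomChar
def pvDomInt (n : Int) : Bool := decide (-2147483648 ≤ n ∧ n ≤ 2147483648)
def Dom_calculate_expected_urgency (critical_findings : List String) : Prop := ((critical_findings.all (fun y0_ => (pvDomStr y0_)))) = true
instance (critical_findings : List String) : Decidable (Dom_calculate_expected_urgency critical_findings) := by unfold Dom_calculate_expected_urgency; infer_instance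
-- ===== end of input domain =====

-- B scores each finding from a keyword-priority table, takes the maximum level, and looks the range up in a table (alternative decomposition; same return value).

-- ===== PORT A =====
def calculate_expected_urgency (critical_findings : List String) : Int × Int :=
  if critical_findings.any (fun finding => PySem.Str.isIn "Pneumothorax" finding) then (4, 5)
  else if critical_findings.any (fun finding => PySem.Str.isIn "Mass" finding) then (3, 4)
  else if critical_findings.any (fun finding => PySem.Str.isIn "Pneumonia" finding) then (3, 4)
  else if critical_findings ≠ [] then (2, 3)
  else (1, 2)

-- ===== PORT B =====
def pvRanges : PySem.Dict Int (Int × Int) := PySem.Dict.ofList [(0, (1, 2)), (1, (2, 3)), (2, (3, 4)), (3, (4, 5))]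
def pvKeywords : PySem.Dict String Int := PySem.Dict.ofList [("Pneumothorax", 3), ("Mass", 2), ("Pneumonia", 2)]

-- Python's max(iter, default=d): d on empty, otherwise the max of the elements.
def pvMaxD (d : Int) (l : List Int) : Int :=
  match l with
  | [] => d
  | v :: rest => rest.foldl max v

def pvScore (finding : String) : Int :=
  pvMaxD 1 ((PySem.Dict.items pvKeywords).filterMap
    (fun kp => if PySem.Str.isIn kp.1 finding then some kp.2 else none))

def calculate_expected_urgency_alt (critical_findings : List String) : Int × Int :=
  let level := pvMaxD 0 (critical_findings.map pvScore)
  -- _RANGES[level]: level is always a key of pvRanges, so the KeyError branch is unreachable; getD's default is never used.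
  PySem.Dict.getD pvRanges level (1, 2)

-- ===== PRECONDITION & SPEC =====
def Spec_calculate_expected_urgency (critical_findings : List String) (out : Int × Int) : Prop := out = calculate_expected_urgency_alt critical_findings
instance (critical_findings : List String) (out : Int × Int) : Decidable (Spec_calculate_expected_urgency critical_findings out) := by unfold Spec_calculate_expected_urgency; infer_instance

-- ===== CLAIM (what is proved, stated in full; the proofs are below) =====
def Claim_equal_calculate_expected_urgency : Prop := ∀ (critical_findings : List String), Dom_calculate_expected_urgency critical_findings → Spec_calculate_expected_urgency critical_findings (calculate_expected_urgency critical_findings)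

-- ===== LEMMAS AND PROOFS =====

theorem pvScore_eq (f : String) :
    pvScore f =
      if PySem.Str.isIn "Pneumothorax" f then 3
      else if PySem.Str.isIn "Mass" f || PySem.Str.isIn "Pneumonia" f then 2
      else 1 := by
  have hit : (PySem.Dict.items pvKeywords) = [("Pneumothorax", (3:Int)), ("Mass", 2), ("Pneumonia", 2)] := by decide
  unfold pvScore
  rw [hit]
  cases hP : PySem.Str.isIn "Pneumothorax" f <;>
    cases hM : PySem.Str.isIn "Mass" f <;>
    cases hN : PySem.Str.isIn "Pneumonia" f <;>
    simp_all [PySem.Str.isIn, pvMaxD]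

theorem pv_foldl_max_le (m : List Int) (a c : Int) (ha : a ≤ c) (hub : ∀ v ∈ m, v ≤ c) :
    m.foldl max a ≤ c := by
  induction m generalizing a with
  | nil => simpa using ha
  | cons v rest ih =>
    simp only [List.foldl_cons]
    exact ih (max a v) (max_le ha (hub v (by simp))) (fun w hw => hub w (by simp [hw]))

theorem pv_le_foldl_max (m : List Int) (a : Int) : a ≤ m.foldl max a := by
  induction m generalizing a with
  | nil => simp
  | cons v rest ih => exact le_trans (le_max_left a v) (ih (max a v))

theorem pv_mem_le_foldl_max (m : List Int) (a c : Int) (hc : c ∈ m) : c ≤ m.foldl max a := by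
  induction m generalizing a with
  | nil => simp at hc
  | cons v rest ih =>
    simp only [List.foldl_cons]
    rcases List.mem_cons.mp hc with rfl | h
    · exact le_trans (le_max_right a c) (pv_le_foldl_max rest _)
    · exact ih _ h

theorem pvMaxD_eq_of (d c : Int) (m : List Int) (hub : ∀ v ∈ m, v ≤ c) (hc : c ∈ m) :
    pvMaxD d m = c := by
  cases m with
  | nil => simp at hc
  | cons v rest =>
    refine le_antisymm (pv_foldl_max_le rest v c (hub v (by simp)) (fun w hw => hub w (by simp [hw]))) ?_
    rcases List.mem_cons.mp hc with rfl | h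
    · exact pv_le_foldl_max rest c
    · exact pv_mem_le_foldl_max rest v c h

theorem pvScore_le_three (f : String) : pvScore f ≤ 3 := by
  rw [pvScore_eq]; split_ifs <;> omega

theorem pvScore_le_two (f : String) (hP : PySem.Str.isIn "Pneumothorax" f = false) : pvScore f ≤ 2 := by
  rw [pvScore_eq, hP]
  simp only [Bool.false_eq_true, if_false]
  split_ifs <;> omega

theorem pv_alt_eq (l : List String) (c : Int) (hc : pvMaxD 0 (l.map pvScore) = c) :
    calculate_expected_urgency_alt l = PySem.Dict.getD pvRanges c (1, 2) := by
  unfold calculate_expected_urgency_alt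
  rw [hc]

-- ===== VERDICT (by name: the statement is the Claim_ definition above) =====
theorem calculate_expected_urgency_spec : Claim_equal_calculate_expected_urgency := by
  intro l _
  show calculate_expected_urgency l = calculate_expected_urgency_alt l
  by_cases h1 : l.any (fun f => PySem.Str.isIn "Pneumothorax" f) = true
  · obtain ⟨f, hf, hPf⟩ := List.any_eq_true.mp h1
    have hlvl : pvMaxD 0 (l.map pvScore) = 3 := by
      refine pvMaxD_eq_of 0 3 _ ?_ ?_
      · intro v hv; obtain ⟨g, _, rfl⟩ := List.mem_map.mp hv; exact pvScore_le_three g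
      · exact List.mem_map.mpr ⟨f, hf, by rw [pvScore_eq, hPf]; simp⟩
    rw [pv_alt_eq l 3 hlvl]
    unfold calculate_expected_urgency
    rw [if_pos h1]
    decide
  · have hnoP : ∀ f ∈ l, PySem.Str.isIn "Pneumothorax" f = false := by
      intro f hf
      by_contra hc
      exact h1 (List.any_eq_true.mpr ⟨f, hf, by simpa using hc⟩)
    by_cases h2 : (l.any (fun f => PySem.Str.isIn "Mass" f) = true) ∨
                  (l.any (fun f => PySem.Str.isIn "Pneumonia" f) = true)
    · have hlvl : pvMaxD 0 (l.map pvScore) = 2 := by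
        refine pvMaxD_eq_of 0 2 _ ?_ ?_
        · intro v hv; obtain ⟨g, hg, rfl⟩ := List.mem_map.mp hv; exact pvScore_le_two g (hnoP g hg)
        · rcases h2 with h2 | h2 <;> obtain ⟨f, hf, hM⟩ := List.any_eq_true.mp h2 <;>
            refine List.mem_map.mpr ⟨f, hf, ?_⟩ <;>
            rw [pvScore_eq, hnoP f hf] <;>
            simp at hM <;> simp [hM]
      rw [pv_alt_eq l 2 hlvl]
      unfold calculate_expected_urgency
      rw [if_neg h1]
      rcases h2 with h2 | h2
      · rw [if_pos h2]; decide
      · by_cases hM : l.any (fun f => PySem.Str.isIn "Mass" f) = true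
        · rw [if_pos hM]; decide
        · rw [if_neg hM, if_pos h2]; decide
    · rw [not_or] at h2
      obtain ⟨h2M, h2N⟩ := h2
      have hnoM : ∀ f ∈ l, PySem.Str.isIn "Mass" f = false := by
        intro f hf; by_contra hc
        exact h2M (List.any_eq_true.mpr ⟨f, hf, by simpa using hc⟩)
      have hnoN : ∀ f ∈ l, PySem.Str.isIn "Pneumonia" f = false := by
        intro f hf; by_contra hc
        exact h2N (List.any_eq_true.mpr ⟨f, hf, by simpa using hc⟩)
      cases l with
      | nil =>
        rw [pv_alt_eq [] 0 rfl]
        decide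
      | cons x xs =>
        have hlvl : pvMaxD 0 ((x :: xs).map pvScore) = 1 := by
          refine pvMaxD_eq_of 0 1 _ ?_ ?_
          · intro v hv; obtain ⟨g, hg, rfl⟩ := List.mem_map.mp hv
            rw [pvScore_eq, hnoP g hg, hnoM g hg, hnoN g hg]; simp
          · exact List.mem_map.mpr ⟨x, by simp, by
              rw [pvScore_eq, hnoP x (by simp), hnoM x (by simp), hnoN x (by simp)]; simp⟩
        rw [pv_alt_eq (x :: xs) 1 hlvl]
        unfold calculate_expected_urgency
        rw [if_neg h1, if_neg h2M, if_neg h2N, if_pos (by simp)]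
        decide
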